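-- pv_equiv track=rewrite | github.com/glmack/foia_mobility | fed_reg.py | classify_sorn_operations
-- ===== SOURCE A (Python) =====
-- def classify_sorn_operations(notices):
--     """Categorize federal register api response based on update type"""
--     created_notices = []
--     modified_notices = []
--     deleted_notices = []
--     other_notices = []
--     blank_notices = []
--
--     # TODO (Lee) - account for blank and generic 'Notice' actions, ('systems of records' - plural ?)e.g.:
--     # 'body_html_url': 'https://www.federalregister.gov/documents/full_text/html/2010/06/07/2010-13481.html',
--     # 'https://www.federalregister.gov/documents/full_text/html/2010/07/26/2010-17934.html',
--     # 'body_html_url': 'https://www.federalregister.gov/documents/full_text/html/2011/01/05/2010-33295.html',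
--
--     # TODO (Lee) - keywords: ['new', 'add', 'establish', 'proposed', 'reinstate']
--     created_indicators = [
--         'notice of a new system of records.',
--         'notice to add a system of records.'
--         'notice of privacy act system of records.',
--         'notice to establish systems of records.',
--         'notice of a new privacy act system of records.',
--         'notice of a new system of records.',
--         'notice of a new system of records; and rescindment of four system of records notices.',
--         'notice of new privacy act system of records.',
--         'notice of privacy act system of records.',
--         'notice of proposed privacy act system of records.',
--         'notice of proposed new system of records.',
--         'notice to add a system of records.',
--         'notice to establish systems of records.',
--         'notice to reinstate a system of records.']
--
--     # TODO (Lee): keywords = ['modified', 'amend', 'alter', 'altered', 'amendment', 'modification', 'revised']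
--     modified_indicators = [
--         'notice of a modified system of records.',
--         'notice to amend a system of records.',
--         'notice of modification to existing Privacy Act system of records.',
--         'notice of amendment of Privacy Act system of records.',
--         'notice to alter a system of records.',
--         'altered system of records and housekeeping changes.',
--         'notice of a modified privacy act system of records.',
--         'notice of a modified system of records.',
--         'notice of amendment of privacy act system of records.',
--         'notice of amendment to system of records.',
--         'notice of changes to systems of records and addition of routine use.',
--         'notice of general amendment to federal reserve board of governors systems of records.',
--         'notice of modification to existing privacy act system of records.',
--         'notice of modified privacy act system of records.',
--         'notice of modified system of records.',
--         'notice of modified systems of records.',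
--         'notice to alter a system of records.',
--         'notice to alter an existing privacy act system of records.',
--         'notice to amend a system of records.',
--         'notice of revised privacy act system notices.', # does not contain word 'record'
--         'notice of revised systems of records.',
--         'notice to amend a record system.'
--     ]
--
--     # TODO (Lee): keywords = ['rescind', 'delete', 'rescindment']
--     deleted_indicators = [
--         'rescindment of a system of records.',
--         'notice to delete a system of records.',
--         'rescindment of a system of records notice (sorn).',
--         'rescindment of a system of records notice.',
--         'rescindment of notices and notice of a new system of records.',
--         'notice to delete a system of records.'
--     ]
--
--  # others/multiple actions: 'notice of the rescission, establishment, and amendment of systems of records.',,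
--  # 'notice to reinstate a system of records.',
--  # 'notice: publication of new and revised systems of records and standard disclosures.',
--
--     for i in notices:
--         if i['action'] is None:
--             blank_notices.append('')
--         elif i['action'].lower() in created_indicators:
--                 created_notices.append(i)
--         elif i['action'].lower() in modified_indicators:
--             modified_notices.append(i)
--         elif i['action'].lower() in deleted_indicators:
--             deleted_notices.append(i)
--         else:
--             other_notices.append(i)
--     return created_notices, modified_notices, deleted_notices, other_notices, blank_notices
-- ===== SOURCE B (Python) =====
-- def classify_sorn_operations(notices):
--     """Categorize federal register api response based on update type"""
--     created_indicators = [
--         'notice of a new system of records.',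
--         'notice to add a system of records.'
--         'notice of privacy act system of records.',
--         'notice to establish systems of records.',
--         'notice of a new privacy act system of records.',
--         'notice of a new system of records.',
--         'notice of a new system of records; and rescindment of four system of records notices.',
--         'notice of new privacy act system of records.',
--         'notice of privacy act system of records.',
--         'notice of proposed privacy act system of records.',
--         'notice of proposed new system of records.',
--         'notice to add a system of records.',
--         'notice to establish systems of records.',
--         'notice to reinstate a system of records.']
--
--     modified_indicators = [
--         'notice of a modified system of records.',
--         'notice to amend a system of records.',
--         'notice of modification to existing Privacy Act system of records.',
--         'notice of amendment of Privacy Act system of records.',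
--         'notice to alter a system of records.',
--         'altered system of records and housekeeping changes.',
--         'notice of a modified privacy act system of records.',
--         'notice of a modified system of records.',
--         'notice of amendment of privacy act system of records.',
--         'notice of amendment to system of records.',
--         'notice of changes to systems of records and addition of routine use.',
--         'notice of general amendment to federal reserve board of governors systems of records.',
--         'notice of modification to existing privacy act system of records.',
--         'notice of modified privacy act system of records.',
--         'notice of modified system of records.',
--         'notice of modified systems of records.',
--         'notice to alter a system of records.',
--         'notice to alter an existing privacy act system of records.',
--         'notice to amend a system of records.',
--         'notice of revised privacy act system notices.',
--         'notice of revised systems of records.',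
--         'notice to amend a record system.'
--     ]
--
--     deleted_indicators = [
--         'rescindment of a system of records.',
--         'notice to delete a system of records.',
--         'rescindment of a system of records notice (sorn).',
--         'rescindment of a system of records notice.',
--         'rescindment of notices and notice of a new system of records.',
--         'notice to delete a system of records.'
--     ]
--
--     # Dispatch table built once, in reverse priority order (deleted, then
--     # modified, then created) so that 'created' overwrites and wins ties,
--     # exactly like the original if/elif chain's precedence.
--     dispatch = {}
--     for ind in deleted_indicators:
--         dispatch[ind] = 2
--     for ind in modified_indicators:
--         dispatch[ind] = 1
--     for ind in created_indicators:
--         dispatch[ind] = 0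
--
--     def tag(i):
--         action = i['action']
--         if action is None:
--             return 4
--         return dispatch.get(action.lower(), 3)
--
--     # Staged passes: one filter per output category (filters preserve order,
--     # so each bucket equals what A's single accumulator loop appends to it).
--     return ([i for i in notices if tag(i) == 0],
--             [i for i in notices if tag(i) == 1],
--             [i for i in notices if tag(i) == 2],
--             [i for i in notices if tag(i) == 3],
--             ['' for i in notices if tag(i) == 4])
-- ===== Notes on version B (the rewrite author's own statement) =====
-- stated objective: alternative
-- what changed: B builds a dispatch table once in reverse-priority order and tags each notice with a category code, then constructs each of the five outputs as an independent filter pass over the notices, instead of A's single accumulator loop with a chained if/elif of list membership scans.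
import Mathlib
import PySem

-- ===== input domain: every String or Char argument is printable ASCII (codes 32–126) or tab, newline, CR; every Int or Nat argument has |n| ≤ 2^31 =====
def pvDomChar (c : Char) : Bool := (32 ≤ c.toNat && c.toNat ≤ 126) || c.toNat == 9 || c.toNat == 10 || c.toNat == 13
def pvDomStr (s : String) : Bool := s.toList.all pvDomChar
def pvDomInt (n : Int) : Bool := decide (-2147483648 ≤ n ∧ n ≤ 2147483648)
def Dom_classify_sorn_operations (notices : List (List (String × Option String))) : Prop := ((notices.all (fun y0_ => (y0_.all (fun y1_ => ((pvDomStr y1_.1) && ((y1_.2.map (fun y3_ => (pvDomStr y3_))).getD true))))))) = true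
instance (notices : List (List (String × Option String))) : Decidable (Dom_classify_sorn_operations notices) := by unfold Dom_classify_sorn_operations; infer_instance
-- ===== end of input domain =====

-- B tags each notice via a dispatch table built in reverse-priority order, then builds
-- each of the five outputs as an independent filter pass (alternative structure, not faster).


-- shared literal data (identical verbatim in Source A and Source B, including the missing-comma concatenation)
def pvCreatedInd : List String := [
  "notice of a new system of records.",
  "notice to add a system of records.notice of privacy act system of records.",
  "notice to establish systems of records.",
  "notice of a new privacy act system of records.",
  "notice of a new system of records.",
  "notice of a new system of records; and rescindment of four system of records notices.",
  "notice of new privacy act system of records.",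
  "notice of privacy act system of records.",
  "notice of proposed privacy act system of records.",
  "notice of proposed new system of records.",
  "notice to add a system of records.",
  "notice to establish systems of records.",
  "notice to reinstate a system of records."]

def pvModifiedInd : List String := [
  "notice of a modified system of records.",
  "notice to amend a system of records.",
  "notice of modification to existing Privacy Act system of records.",
  "notice of amendment of Privacy Act system of records.",
  "notice to alter a system of records.",
  "altered system of records and housekeeping changes.",
  "notice of a modified privacy act system of records.",
  "notice of a modified system of records.",
  "notice of amendment of privacy act system of records.",
  "notice of amendment to system of records.",
  "notice of changes to systems of records and addition of routine use.",
  "notice of general amendment to federal reserve board of governors systems of records.",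
  "notice of modification to existing privacy act system of records.",
  "notice of modified privacy act system of records.",
  "notice of modified system of records.",
  "notice of modified systems of records.",
  "notice to alter a system of records.",
  "notice to alter an existing privacy act system of records.",
  "notice to amend a system of records.",
  "notice of revised privacy act system notices.",
  "notice of revised systems of records.",
  "notice to amend a record system."]

def pvDeletedInd : List String := [
  "rescindment of a system of records.",
  "notice to delete a system of records.",
  "rescindment of a system of records notice (sorn).",
  "rescindment of a system of records notice.",
  "rescindment of notices and notice of a new system of records.",
  "notice to delete a system of records."]

-- state: (created, modified, deleted, other, blank)
abbrev pvSt := (List (List (String × Option String))) × (List (List (String × Option String))) × (List (List (String × Option String))) × (List (List (String × Option String))) × List String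

-- ===== PORT A =====
-- A's loop body: if/elif chain of membership tests (i['action'] missing = KeyError, excluded by Pre_; the port skips there)
def pvStepA (st : pvSt) (i : List (String × Option String)) : pvSt :=
  match st with
  | (c, m, d, o, b) =>
    match PySem.Dict.get? (PySem.Dict.mk i) "action" with
    | none => (c, m, d, o, b)
    | some none => (c, m, d, o, b ++ [""])
    | some (some a) =>
      let l := PySem.Str.lower a
      if pvCreatedInd.contains l then (c ++ [i], m, d, o, b)
      else if pvModifiedInd.contains l then (c, m ++ [i], d, o, b)
      else if pvDeletedInd.contains l then (c, m, d ++ [i], o, b)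
      else (c, m, d, o ++ [i], b)

def classify_sorn_operations (notices : List (List (String × Option String))) : (List (List (String × Option String))) × (List (List (String × Option String))) × (List (List (String × Option String))) × (List (List (String × Option String))) × List String :=
  notices.foldl pvStepA ([], [], [], [], [])

-- ===== PORT B =====
-- Source B's dispatch dict, populated in reverse priority order so created overwrites
def pvDispatch : PySem.Dict String Int :=
  let d0 := pvDeletedInd.foldl (fun d k => d.insert k 2) PySem.Dict.empty
  let d1 := pvModifiedInd.foldl (fun d k => d.insert k 1) d0
  pvCreatedInd.foldl (fun d k => d.insert k 0) d1

-- Source B's tag(i): None -> 4, else dispatch.get(action.lower(), 3); a missing 'action' key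
-- (KeyError in Python, outside Pre_) is given the unused tag 5
def pvTagB (i : List (String × Option String)) : Int :=
  match PySem.Dict.get? (PySem.Dict.mk i) "action" with
  | none => 5
  | some none => 4
  | some (some a) => pvDispatch.getD (PySem.Str.lower a) 3

-- Source B's five comprehensions: one filter pass per output category
def classify_sorn_operations_alt (notices : List (List (String × Option String))) : (List (List (String × Option String))) × (List (List (String × Option String))) × (List (List (String × Option String))) × (List (List (String × Option String))) × List String :=
  (notices.filter (fun i => pvTagB i == 0),
   notices.filter (fun i => pvTagB i == 1),
   notices.filter (fun i => pvTagB i == 2),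
   notices.filter (fun i => pvTagB i == 3),
   (notices.filter (fun i => pvTagB i == 4)).map (fun _ => ""))

-- ===== PRECONDITION & SPEC =====
-- Pre_ excludes exactly the notices lacking an 'action' key, where Python A raises KeyError.
def Pre_classify_sorn_operations (notices : List (List (String × Option String))) : Prop :=
  ∀ i ∈ notices, "action" ∈ i.map Prod.fst
instance (notices : List (List (String × Option String))) : Decidable (Pre_classify_sorn_operations notices) := by unfold Pre_classify_sorn_operations; infer_instance

def pvWitness_classify_sorn_operations : (List (List (String × Option String))) :=
  [[("action", some "Notice of a new system of records.")], [("action", none)], [("action", some "x")]]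

def Spec_classify_sorn_operations (notices : List (List (String × Option String))) (out : (List (List (String × Option String))) × (List (List (String × Option String))) × (List (List (String × Option String))) × (List (List (String × Option String))) × List String) : Prop := out = classify_sorn_operations_alt notices
instance (notices : List (List (String × Option String))) (out : (List (List (String × Option String))) × (List (List (String × Option String))) × (List (List (String × Option String))) × (List (List (String × Option String))) × List String) : Decidable (Spec_classify_sorn_operations notices out) := by
  unfold Spec_classify_sorn_operations
  -- built stepwise: the nested-product DecidableEq exceeds the synthesizer's default term-size limit
  haveI h1 : DecidableEq ((List (List (String × Option String))) × List String) := instDecidableEqProd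
  haveI h2 : DecidableEq ((List (List (String × Option String))) × (List (List (String × Option String))) × List String) := instDecidableEqProd
  haveI h3 : DecidableEq ((List (List (String × Option String))) × (List (List (String × Option String))) × (List (List (String × Option String))) × List String) := instDecidableEqProd
  haveI h4 : DecidableEq ((List (List (String × Option String))) × (List (List (String × Option String))) × (List (List (String × Option String))) × (List (List (String × Option String))) × List String) := instDecidableEqProd
  exact h4 _ _

-- ===== CLAIM (what is proved, stated in full; the proofs are below) =====
def Claim_equal_classify_sorn_operations : Prop := ∀ (notices : List (List (String × Option String))), Dom_classify_sorn_operations notices → Pre_classify_sorn_operations notices → Spec_classify_sorn_operations notices (classify_sorn_operations notices)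

-- ===== LEMMAS AND PROOFS =====
-- 'for k in l: d[k] = v' read back through getD
lemma pvGetD_foldl_insert_const (l : List String) (v : Int) (d : PySem.Dict String Int)
    (s : String) (d0 : Int) :
    (l.foldl (fun d k => d.insert k v) d).getD s d0 =
      if l.contains s then v else d.getD s d0 := by
  induction l generalizing d with
  | nil => simp
  | cons k l ih =>
    simp only [List.foldl_cons, ih, PySem.Dict.getD_insert, List.contains_cons]
    by_cases hk : s = k <;> by_cases hl : l.contains s <;> simp [hk]

-- the dispatch table agrees with A's if/elif chain for every key
lemma pvDispatch_spec (s : String) :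
    pvDispatch.getD s 3 =
      (if pvCreatedInd.contains s then 0
       else if pvModifiedInd.contains s then 1
       else if pvDeletedInd.contains s then 2 else 3 : Int) := by
  simp only [pvDispatch, pvGetD_foldl_insert_const, PySem.Dict.getD_empty]

-- A's step routed through B's tag
lemma pvStepA_tag (st : pvSt) (i : List (String × Option String)) :
    pvStepA st i =
      match st with
      | (c, m, d, o, b) =>
        if pvTagB i = 0 then (c ++ [i], m, d, o, b)
        else if pvTagB i = 1 then (c, m ++ [i], d, o, b)
        else if pvTagB i = 2 then (c, m, d ++ [i], o, b)
        else if pvTagB i = 3 then (c, m, d, o ++ [i], b)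
        else if pvTagB i = 4 then (c, m, d, o, b ++ [""])
        else (c, m, d, o, b) := by
  obtain ⟨c, m, d, o, b⟩ := st
  have h : ∀ x : Option (Option String), x = PySem.Dict.get? (PySem.Dict.mk i) "action" →
      pvTagB i = (match x with
        | none => 5
        | some none => 4
        | some (some a) => pvDispatch.getD (PySem.Str.lower a) 3) := by
    intro x hx; simp [pvTagB, ← hx]
  simp only [pvStepA]
  cases hx : PySem.Dict.get? (PySem.Dict.mk i) "action" with
  | none => rw [h _ hx.symm]; norm_num
  | some oa =>
    cases oa with
    | none => rw [h _ hx.symm]; norm_num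
    | some a =>
      rw [h _ hx.symm]
      simp only [pvDispatch_spec (PySem.Str.lower a)]
      split_ifs <;> first | rfl | omega

-- single accumulator pass = five staged filter passes (generalized invariant)
lemma pvFoldl_filters (l : List (List (String × Option String))) (c m d o : List (List (String × Option String))) (b : List String) :
    l.foldl pvStepA (c, m, d, o, b) =
      (c ++ l.filter (fun i => pvTagB i == 0),
       m ++ l.filter (fun i => pvTagB i == 1),
       d ++ l.filter (fun i => pvTagB i == 2),
       o ++ l.filter (fun i => pvTagB i == 3),
       b ++ (l.filter (fun i => pvTagB i == 4)).map (fun _ => "")) := by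
  induction l generalizing c m d o b with
  | nil => simp
  | cons i l ih =>
    simp only [List.foldl_cons, pvStepA_tag, List.filter_cons]
    by_cases h0 : pvTagB i = 0
    · simp [h0, ih]
    · by_cases h1 : pvTagB i = 1
      · simp [h1, ih]
      · by_cases h2 : pvTagB i = 2
        · simp [h2, ih]
        · by_cases h3 : pvTagB i = 3
          · simp [h3, ih]
          · by_cases h4 : pvTagB i = 4
            · simp [h4, ih]
            · simp [h0, h1, h2, h3, h4, ih]

-- ===== VERDICT (by name: the statement is the Claim_ definition above) =====
theorem classify_sorn_operations_spec : Claim_equal_classify_sorn_operations := by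
  intro notices _ _
  unfold Spec_classify_sorn_operations classify_sorn_operations classify_sorn_operations_alt
  simp [pvFoldl_filters]
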